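-- pv_equiv track=rewrite | github.com/hectorgarzon/Poker-Game-Analyzer | src/pokerhero/analysis/stats.py | _board_at_street
-- ===== SOURCE A (Python) =====
-- def _board_at_street(
--     board_flop: str | None,
--     board_turn: str | None,
--     board_river: str | None,
--     street: str,
-- ) -> str:
--     """Return the board string visible at the start of *street*."""
--     flop = board_flop or ""
--     turn = board_turn or ""
--     river = board_river or ""
--     if street == "FLOP":
--         return flop.strip()
--     if street == "TURN":
--         return f"{flop} {turn}".strip()
--     if street == "RIVER":
--         return " ".join(x for x in [flop, turn, river] if x).strip()
--     return ""
-- ===== SOURCE B (Python) =====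
-- def _board_at_street(
--     board_flop: str | None,
--     board_turn: str | None,
--     board_river: str | None,
--     street: str,
-- ) -> str:
--     """Return the board string visible at the start of *street*."""
--     acc = ""
--     for name, part in (
--         ("FLOP", board_flop or ""),
--         ("TURN", board_turn or ""),
--         ("RIVER", board_river or ""),
--     ):
--         if part:
--             acc = f"{acc} {part}" if acc else part
--         if street == name:
--             return acc.strip()
--     return ""
-- ===== Notes on version B (the rewrite author's own statement) =====
-- stated objective: simpler
-- what changed: Replaces the three heterogeneous per-street formatting branches (strip, f-string concat, filtered join) by a single left-to-right pass over the (street-name, segment) stages maintaining one accumulator string that is extended with each nonempty segment, returning the stripped accumulator as soon as the requested street's stage is reached.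
import Mathlib
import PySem

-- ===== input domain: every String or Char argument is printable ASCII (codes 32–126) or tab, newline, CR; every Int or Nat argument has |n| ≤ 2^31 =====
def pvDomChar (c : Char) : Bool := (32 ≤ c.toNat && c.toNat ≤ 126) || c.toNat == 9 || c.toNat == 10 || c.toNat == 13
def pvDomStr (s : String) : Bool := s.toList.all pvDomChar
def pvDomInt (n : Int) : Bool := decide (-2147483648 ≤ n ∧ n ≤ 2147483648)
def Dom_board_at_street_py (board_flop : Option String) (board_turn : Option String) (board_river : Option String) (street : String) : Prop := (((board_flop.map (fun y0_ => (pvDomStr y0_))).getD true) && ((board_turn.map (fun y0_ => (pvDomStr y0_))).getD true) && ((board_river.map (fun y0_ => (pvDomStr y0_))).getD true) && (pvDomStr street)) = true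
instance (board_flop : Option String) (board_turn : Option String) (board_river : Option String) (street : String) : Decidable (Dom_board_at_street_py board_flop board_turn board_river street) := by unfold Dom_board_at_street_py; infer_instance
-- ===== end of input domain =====

-- B replaces A's three per-street formatting branches by one early-exit pass over the
-- (street-name, segment) stages with a single accumulator (objective: simpler decomposition).
-- ===== PORT A =====
def board_at_street_py (board_flop : Option String) (board_turn : Option String) (board_river : Option String) (street : String) : String :=
  let flop := board_flop.getD ""
  let turn := board_turn.getD ""
  let river := board_river.getD ""
  if street = "FLOP" then PySem.Str.strip flop
  else if street = "TURN" then PySem.Str.strip (String.ofList (flop.toList ++ ' ' :: turn.toList))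
  else if street = "RIVER" then
    PySem.Str.strip (PySem.Str.join " " (([flop, turn, river]).filter (fun x => !(x == ""))))
  else ""

-- ===== PORT B =====
-- the loop body of B: fold over the remaining (name, part) stages carrying the accumulator
def pvAltLoop (street : String) (acc : String) : List (String × String) → String
  | [] => ""
  | (name, part) :: rest =>
      let acc' := if part ≠ "" then (if acc ≠ "" then String.ofList (acc.toList ++ ' ' :: part.toList) else part) else acc
      if street = name then PySem.Str.strip acc' else pvAltLoop street acc' rest

def board_at_street_py_alt (board_flop : Option String) (board_turn : Option String) (board_river : Option String) (street : String) : String :=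
  pvAltLoop street "" [("FLOP", board_flop.getD ""), ("TURN", board_turn.getD ""), ("RIVER", board_river.getD "")]

-- ===== PRECONDITION & SPEC =====
def Spec_board_at_street_py (board_flop : Option String) (board_turn : Option String) (board_river : Option String) (street : String) (out : String) : Prop := out = board_at_street_py_alt board_flop board_turn board_river street
instance (board_flop : Option String) (board_turn : Option String) (board_river : Option String) (street : String) (out : String) : Decidable (Spec_board_at_street_py board_flop board_turn board_river street out) := by unfold Spec_board_at_street_py; infer_instance

-- ===== CLAIM (what is proved, stated in full; the proofs are below) =====
def Claim_equal_board_at_street_py : Prop := ∀ (board_flop : Option String) (board_turn : Option String) (board_river : Option String) (street : String), Dom_board_at_street_py board_flop board_turn board_river street → Spec_board_at_street_py board_flop board_turn board_river street (board_at_street_py board_flop board_turn board_river street)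

-- ===== LEMMAS AND PROOFS =====

-- strip ignores a single leading space
lemma strip_cons_space (cs : List Char) : PySem.Chars.strip (' ' :: cs) = PySem.Chars.strip cs := by
  simp [PySem.Chars.strip, PySem.Chars.lstrip, List.dropWhile, (by decide : PySem.Chars.isspace ' ' = true)]

-- rstrip ignores a single trailing space
lemma rstrip_snoc_space (cs : List Char) : PySem.Chars.rstrip (cs ++ [' ']) = PySem.Chars.rstrip cs := by
  simp [PySem.Chars.rstrip, (by decide : PySem.Chars.isspace ' ' = true)]

-- strip ignores a single trailing space
lemma strip_snoc_space (cs : List Char) : PySem.Chars.strip (cs ++ [' ']) = PySem.Chars.strip cs := by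
  simp only [PySem.Chars.strip, PySem.Chars.lstrip, List.dropWhile_append]
  by_cases h : (List.dropWhile PySem.Chars.isspace cs).isEmpty
  · rw [if_pos h, List.isEmpty_iff.mp h]
    simp [List.dropWhile, (by decide : PySem.Chars.isspace ' ' = true)]
  · rw [if_neg h]
    exact rstrip_snoc_space _

-- ===== VERDICT (by name: the statement is the Claim_ definition above) =====
theorem board_at_street_py_spec : Claim_equal_board_at_street_py := by
  intro board_flop board_turn board_river street _
  unfold Spec_board_at_street_py board_at_street_py board_at_street_py_alt
  set f := board_flop.getD "" with hf
  set t := board_turn.getD "" with ht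
  set r := board_river.getD "" with hr
  by_cases h1 : street = "FLOP"
  · subst h1
    simp only [pvAltLoop]
    by_cases hfe : f = "" <;> simp [hfe]
  · by_cases h2 : street = "TURN"
    · subst h2
      have h1' : ("TURN" : String) ≠ "FLOP" := by decide
      simp only [pvAltLoop, if_neg h1']
      apply String.toList_inj.mp
      by_cases hfe : f = "" <;> by_cases hte : t = "" <;>
        simp [hfe, hte, PySem.Str.toList_strip, strip_cons_space, strip_snoc_space]
    · by_cases h3 : street = "RIVER"
      · subst h3
        simp only [pvAltLoop,
          if_neg (by decide : ¬ ("RIVER" : String) = "FLOP"),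
          if_neg (by decide : ¬ ("RIVER" : String) = "TURN")]
        apply String.toList_inj.mp
        by_cases hfe : f = "" <;> by_cases hte : t = "" <;> by_cases hre : r = "" <;>
          simp [hfe, hte, hre, PySem.Str.toList_strip, PySem.Str.toList_join,
            PySem.Chars.join, List.intercalate, strip_cons_space]
      · simp only [pvAltLoop, if_neg h1, if_neg h2, if_neg h3]
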